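-- pv_equiv track=rewrite | github.com/JianqiaoMao/Real-time-Vision-based-Sign-Language-Recognition-System | gesture_recognition_system.py | contLowEdge
-- ===== SOURCE A (Python) =====
-- def contLowEdge(li,contNum):
--     zeroCount=0
--     oneCount=0
--     le=9999
--     for i in range(len(li)):
--         if li[i]==0:
--             zeroCount+=1
--             if zeroCount>=contNum:
--                 le=i
--             oneCount=0
--         else:
--             oneCount+=1
--             if oneCount<80:
--                 None
--             else:
--                 le=9999
--                 break
--             zeroCount=0
--     return le
-- ===== SOURCE B (Python) =====
-- def contLowEdge(li, contNum):
--     le = 9999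
--     n = len(li)
--     i = 0
--     while i < n:
--         key = li[i] == 0
--         j = i
--         while j < n and (li[j] == 0) == key:
--             j += 1
--         L = j - i
--         if key:
--             if L >= contNum:
--                 le = j - 1
--         elif L >= 80:
--             return 9999
--         i = j
--     return le
-- ===== Notes on version B (the rewrite author's own statement) =====
-- stated objective: alternative
-- what changed: Replaces the per-element scan with two counters by a run-based scan: each maximal run of zeros/non-zeros is measured once and le is updated from the run's length and end index.
import Mathlib
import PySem

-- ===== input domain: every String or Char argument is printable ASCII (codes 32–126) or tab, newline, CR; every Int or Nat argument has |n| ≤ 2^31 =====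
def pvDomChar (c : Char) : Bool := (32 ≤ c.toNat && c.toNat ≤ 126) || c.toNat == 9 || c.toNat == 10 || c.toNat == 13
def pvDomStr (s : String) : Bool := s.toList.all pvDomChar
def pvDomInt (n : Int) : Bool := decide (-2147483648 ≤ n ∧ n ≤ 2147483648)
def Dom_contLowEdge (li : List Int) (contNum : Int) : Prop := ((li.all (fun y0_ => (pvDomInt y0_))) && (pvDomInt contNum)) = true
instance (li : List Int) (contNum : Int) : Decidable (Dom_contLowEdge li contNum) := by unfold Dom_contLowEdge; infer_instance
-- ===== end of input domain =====

-- B replaces A's per-element scan with two counters by a run-based scan (one maximal run at a time); alternative decomposition, same cost.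

-- ===== PORT A =====
-- A's for-loop over indices, carrying zeroCount, oneCount, le; break returns 9999.
def contLowEdgeGoA (cn : Int) : Int → Int → Int → Int → List Int → Int
  | _, _, _, le, [] => le
  | i, zc, oc, le, x :: xs =>
    if x = 0 then
      contLowEdgeGoA cn (i + 1) (zc + 1) 0 (if zc + 1 ≥ cn then i else le) xs
    else
      if oc + 1 < 80 then contLowEdgeGoA cn (i + 1) 0 (oc + 1) le xs
      else 9999

def contLowEdge (li : List Int) (contNum : Int) : Int :=
  contLowEdgeGoA contNum 0 0 0 9999 li

-- ===== PORT B =====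
-- B's outer while-loop: one step per maximal run starting at index idx.
def contLowEdgeGoB (cn : Int) : Int → Int → List Int → Int
  | _, le, [] => le
  | idx, le, x :: xs =>
    let p : Int → Bool := fun y => decide (y = 0) == decide (x = 0)
    let L : Int := ((xs.takeWhile p).length : Int) + 1
    let rest := xs.dropWhile p
    if x = 0 then contLowEdgeGoB cn (idx + L) (if L ≥ cn then idx + L - 1 else le) rest
    else if L ≥ 80 then 9999
    else contLowEdgeGoB cn (idx + L) le rest
termination_by _ _ li => li.length
decreasing_by
  all_goals exact Nat.lt_succ_of_le (List.length_dropWhile_le _ _)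

def contLowEdge_alt (li : List Int) (contNum : Int) : Int :=
  contLowEdgeGoB contNum 0 9999 li

-- ===== PRECONDITION & SPEC =====
def Spec_contLowEdge (li : List Int) (contNum : Int) (out : Int) : Prop := out = contLowEdge_alt li contNum
instance (li : List Int) (contNum : Int) (out : Int) : Decidable (Spec_contLowEdge li contNum out) := by unfold Spec_contLowEdge; infer_instance

-- ===== CLAIM (what is proved, stated in full; the proofs are below) =====
def Claim_equal_contLowEdge : Prop := ∀ (li : List Int) (contNum : Int), Dom_contLowEdge li contNum → Spec_contLowEdge li contNum (contLowEdge li contNum)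

-- ===== LEMMAS AND PROOFS =====

-- A zero run of length k: zeroCount grows to zc+k, oneCount resets, and le ends at the
-- run's last index i+k-1 iff zc+k ≥ cn (the last update wins).
theorem contLowEdgeGoA_zero_run (cn : Int) :
    ∀ (k : Nat) (rest : List Int) (i zc oc le : Int),
      contLowEdgeGoA cn i zc oc le (List.replicate k 0 ++ rest) =
        contLowEdgeGoA cn (i + k) (zc + k) (if k = 0 then oc else 0)
          (if k ≠ 0 ∧ zc + (k : Int) ≥ cn then i + k - 1 else le) rest := by
  intro k
  induction k with
  | zero => intro rest i zc oc le; simp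
  | succ m ih =>
    intro rest i zc oc le
    rw [List.replicate_succ, List.cons_append]
    have h1 : contLowEdgeGoA cn i zc oc le (0 :: (List.replicate m 0 ++ rest)) =
        contLowEdgeGoA cn (i + 1) (zc + 1) 0 (if zc + 1 ≥ cn then i else le)
          (List.replicate m 0 ++ rest) := by
      simp [contLowEdgeGoA]
    rw [h1, ih]
    congr 1
    · push_cast; ring
    · push_cast; ring
    · split_ifs <;> simp_all
    · split_ifs <;> push_cast at * <;> omega

-- A nonzero run shorter than the break threshold: oneCount grows, zeroCount resets, le unchanged.
theorem contLowEdgeGoA_nonzero_short (cn : Int) :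
    ∀ (ns : List Int), (∀ y ∈ ns, y ≠ 0) → ∀ (rest : List Int) (i zc oc le : Int),
      oc + (ns.length : Int) < 80 → 0 ≤ oc →
      contLowEdgeGoA cn i zc oc le (ns ++ rest) =
        contLowEdgeGoA cn (i + ns.length) (if ns = [] then zc else 0) (oc + ns.length) le rest := by
  intro ns
  induction ns with
  | nil => intro _ rest i zc oc le _ _; simp
  | cons x ns' ih =>
    intro hns rest i zc oc le hlt hnn
    have hx : x ≠ 0 := hns x (by simp)
    have hlen : ((x :: ns').length : Int) = (ns'.length : Int) + 1 := by simp
    rw [hlen] at hlt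
    simp only [List.cons_append, contLowEdgeGoA, if_neg hx]
    rw [if_pos (by omega)]
    rw [ih (fun y hy => hns y (by simp [hy])) rest (i + 1) 0 (oc + 1) le (by omega) (by omega)]
    congr 1
    · rw [hlen]; ring
    · split_ifs <;> simp_all
    · rw [hlen]; ring

-- A nonzero run that reaches the threshold: the loop breaks with le = 9999.
theorem contLowEdgeGoA_nonzero_long (cn : Int) :
    ∀ (ns : List Int), (∀ y ∈ ns, y ≠ 0) → ∀ (rest : List Int) (i zc oc le : Int),
      oc < 80 → oc + (ns.length : Int) ≥ 80 →
      contLowEdgeGoA cn i zc oc le (ns ++ rest) = 9999 := by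
  intro ns
  induction ns with
  | nil => intro _ rest i zc oc le h1 h2; simp at h2; omega
  | cons x ns' ih =>
    intro hns rest i zc oc le h1 h2
    have hx : x ≠ 0 := hns x (by simp)
    have hlen : ((x :: ns').length : Int) = (ns'.length : Int) + 1 := by simp
    rw [hlen] at h2
    simp only [List.cons_append, contLowEdgeGoA, if_neg hx]
    by_cases h3 : oc + 1 < 80
    · rw [if_pos h3]
      exact ih (fun y hy => hns y (by simp [hy])) rest (i + 1) 0 (oc + 1) le h3 (by omega)
    · rw [if_neg h3]

theorem head?_dropWhile_false {α : Type} (p : α → Bool) :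
    ∀ (l : List α) (y : α), (l.dropWhile p).head? = some y → p y = false := by
  intro l
  induction l with
  | nil => intro y h; simp at h
  | cons x xs ih =>
    intro y h
    by_cases hp : p x
    · rw [List.dropWhile_cons_of_pos hp] at h; exact ih y h
    · rw [List.dropWhile_cons_of_neg hp] at h
      simp at h
      subst h
      simpa using hp

-- Main run-boundary lemma: at a run boundary (zc = 0 if the head is zero, oc = 0 and
-- nonnegative otherwise) the two loops agree.
theorem contLowEdgeGoAB (cn : Int) :
    ∀ (n : Nat) (li : List Int), li.length ≤ n → ∀ (i zc oc le : Int),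
      (li.head? = some 0 → zc = 0) →
      ((∃ y, li.head? = some y ∧ y ≠ 0) → oc = 0) →
      0 ≤ oc →
      contLowEdgeGoA cn i zc oc le li = contLowEdgeGoB cn i le li := by
  intro n
  induction n with
  | zero =>
    intro li hlen i zc oc le _ _ _
    match li with
    | [] => simp [contLowEdgeGoA, contLowEdgeGoB]
    | _ :: _ => simp at hlen
  | succ m ih =>
    intro li hlen i zc oc le hzc hoc hocnn
    match li with
    | [] => simp [contLowEdgeGoA, contLowEdgeGoB]
    | x :: xs =>
      set p : Int → Bool := fun y => decide (y = 0) == decide (x = 0) with hp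
      have hsplit : xs = xs.takeWhile p ++ xs.dropWhile p := (List.takeWhile_append_dropWhile).symm
      have htake : ∀ y ∈ xs.takeWhile p, p y = true := fun y hy => List.mem_takeWhile_imp hy
      have hrestlen : (xs.dropWhile p).length ≤ m := by
        have h1 := List.length_dropWhile_le p xs
        simp only [List.length_cons] at hlen
        omega
      have hresthead : ∀ y, (xs.dropWhile p).head? = some y → ((y = 0) ↔ ¬ (x = 0)) := by
        intro y hy
        have h1 := head?_dropWhile_false p xs y hy
        rw [hp] at h1
        simp only [beq_eq_false_iff_ne, ne_eq, decide_eq_decide] at h1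
        tauto
      have hli : x :: xs = (x :: xs.takeWhile p) ++ xs.dropWhile p := by
        rw [List.cons_append]
        exact congrArg (x :: ·) hsplit
      have hBstep : contLowEdgeGoB cn i le (x :: xs) =
          if x = 0 then
            contLowEdgeGoB cn (i + (((xs.takeWhile p).length : Int) + 1))
              (if ((xs.takeWhile p).length : Int) + 1 ≥ cn then
                i + (((xs.takeWhile p).length : Int) + 1) - 1 else le)
              (xs.dropWhile p)
          else if ((xs.takeWhile p).length : Int) + 1 ≥ 80 then 9999
          else contLowEdgeGoB cn (i + (((xs.takeWhile p).length : Int) + 1)) le (xs.dropWhile p) := by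
        rw [contLowEdgeGoB, ← hp]
      by_cases hx : x = 0
      · -- zero run
        have hz : ∀ y ∈ x :: xs.takeWhile p, y = 0 := by
          intro y hy
          rcases List.mem_cons.mp hy with h | h
          · rw [h, hx]
          · have h1 := htake y h
            rw [hp] at h1
            simp only [beq_iff_eq, decide_eq_decide] at h1
            exact h1.mpr hx
        have hrep : x :: xs.takeWhile p = List.replicate ((xs.takeWhile p).length + 1) 0 := by
          have : ((x :: xs.takeWhile p).length) = (xs.takeWhile p).length + 1 := by simp
          rw [← this]
          exact List.eq_replicate_length.mpr hz
        have hzc0 : zc = 0 := hzc (by rw [List.head?_cons, hx])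
        conv_lhs => rw [hli, hrep]
        rw [contLowEdgeGoA_zero_run cn]
        rw [ih (xs.dropWhile p) hrestlen _ _ _ _
            (fun h => absurd hx ((hresthead 0 h).mp rfl))
            (fun _ => by simp)
            (by simp)]
        rw [hzc0, hBstep, if_pos hx]
        congr 1 <;> push_cast <;> (try split_ifs) <;> omega
      · -- nonzero run
        have hnz : ∀ y ∈ x :: xs.takeWhile p, y ≠ 0 := by
          intro y hy
          rcases List.mem_cons.mp hy with h | h
          · rw [h]; exact hx
          · have h1 := htake y h
            rw [hp] at h1
            simp only [beq_iff_eq, decide_eq_decide] at h1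
            intro hy0
            exact hx (h1.mp hy0)
        have hoc0 : oc = 0 := hoc ⟨x, by rw [List.head?_cons], hx⟩
        have hlenc : ((x :: xs.takeWhile p).length : Int) = ((xs.takeWhile p).length : Int) + 1 := by
          simp
        by_cases hlong : ((xs.takeWhile p).length : Int) + 1 ≥ 80
        · conv_lhs => rw [hli]
          rw [contLowEdgeGoA_nonzero_long cn _ hnz _ _ _ _ _ (by omega)
            (by rw [hoc0, hlenc]; omega)]
          rw [hBstep, if_neg hx, if_pos hlong]
        · conv_lhs => rw [hli]
          rw [contLowEdgeGoA_nonzero_short cn _ hnz _ _ _ _ _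
            (by rw [hoc0, hlenc]; omega) (by omega)]
          rw [if_neg (List.cons_ne_nil _ _)]
          rw [ih (xs.dropWhile p) hrestlen _ _ _ _
              (fun _ => rfl)
              (fun ⟨y, hy, hyne⟩ => absurd ((hresthead y hy).mpr hx) hyne)
              (by rw [hoc0]; positivity)]
          rw [hBstep, if_neg hx, if_neg hlong]
          congr 1

-- ===== VERDICT (by name: the statement is the Claim_ definition above) =====
theorem contLowEdge_spec : Claim_equal_contLowEdge := by
  intro li cn _
  unfold Spec_contLowEdge contLowEdge contLowEdge_alt
  exact contLowEdgeGoAB cn li.length li (le_refl _) 0 0 0 9999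
    (fun _ => rfl) (fun _ => rfl) (le_refl 0)
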